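-- pv_equiv track=rewrite | github.com/SiddhantSadangi/catalyst | catalyst/loggers/neptune.py | _prepare_metrics
-- ===== SOURCE A (Python) =====
-- def _prepare_metrics(metrics):
--     conflict_keys = []
--     processed_metrics = dict(metrics)
--     for k in list(processed_metrics.keys()):
--         if k.endswith("/std"):
--             k_stripped = k[:-4]
--             k_val = f"{k_stripped}/val"
--             if k_val not in processed_metrics.keys():
--                 processed_metrics[k_val] = processed_metrics.pop(k_stripped)
--     for k in processed_metrics:
--         for j in processed_metrics:
--             if j.startswith(k) and j != k and k not in conflict_keys:
--                 conflict_keys.append(k)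
--     for i in conflict_keys:
--         processed_metrics[f"{i}_val"] = processed_metrics.pop(i)
--     return processed_metrics
-- ===== SOURCE B (Python) =====
-- def _prepare_metrics(metrics):
--     d = dict(metrics)
--     # fold "<base>/std" companions: rename <base> to "<base>/val" when that key is absent
--     for k in [k for k in d if k.endswith("/std")]:
--         base = k[:-4]
--         if base + "/val" not in d:
--             d[base + "/val"] = d.pop(base)
--     # a key conflicts iff it is a proper prefix of another key; after sorting, that
--     # holds iff the key's immediate successor in sorted order starts with it
--     ks = sorted(d)
--     flagged = {a for a, b in zip(ks, ks[1:]) if b.startswith(a)}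
--     for k in [k for k in d if k in flagged]:
--         d[k + "_val"] = d.pop(k)
--     return d
-- ===== Notes on version B (the rewrite author's own statement) =====
-- stated objective: faster
-- what changed: The O(n^2) nested key-against-key prefix scan is replaced by sorting the keys once and flagging a key as a conflict iff its immediate successor in sorted order starts with it; the loops are also decomposed differently (pre-filtered iteration lists).
import Mathlib
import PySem

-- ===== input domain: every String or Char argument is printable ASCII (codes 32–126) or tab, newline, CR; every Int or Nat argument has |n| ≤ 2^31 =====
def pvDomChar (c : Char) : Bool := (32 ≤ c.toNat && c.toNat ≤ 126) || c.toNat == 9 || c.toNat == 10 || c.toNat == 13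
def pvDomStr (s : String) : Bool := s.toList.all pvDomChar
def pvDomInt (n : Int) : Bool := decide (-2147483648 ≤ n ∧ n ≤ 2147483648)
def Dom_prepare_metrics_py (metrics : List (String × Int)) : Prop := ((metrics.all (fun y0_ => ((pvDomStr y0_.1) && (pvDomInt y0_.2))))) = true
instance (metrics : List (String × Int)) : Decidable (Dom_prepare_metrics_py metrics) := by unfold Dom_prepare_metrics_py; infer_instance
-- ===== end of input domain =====

-- B replaces A's O(n^2) nested key-against-key prefix scan: it sorts the keys once and
-- flags a key as a conflict iff its immediate successor in sorted order starts with it.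

-- ===== PORT A =====
-- keys are handled as List Char (PySem.Chars is the exact string model); the final
-- dict is returned as its items list per the dict -> association-list convention.
def prepare_metrics_py (metrics : List (String × Int)) : List (String × Int) :=
  -- processed_metrics = dict(metrics)
  let d0 : PySem.Dict (List Char) Int :=
    PySem.Dict.ofList (metrics.map (fun p => (p.1.toList, p.2)))
  -- for k in list(processed_metrics.keys()): if k.endswith("/std"): ...
  let d1 := d0.keys.foldl (fun d k =>
    if PySem.Chars.endswith k "/std".toList then
      let ks := PySem.List.slice k none (some (-4))
      let kv := ks ++ "/val".toList
      if d.contains kv then d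
      else
        match d.pop? ks with
        | some (v, d') => d'.insert kv v
        | none => d          -- Python raises KeyError here; excluded by Pre_
    else d) d0
  -- nested loop building conflict_keys
  let conflict := d1.keys.foldl (fun acc k =>
    d1.keys.foldl (fun acc2 j =>
      if (PySem.Chars.startswith j k && j != k) && !(acc2.contains k)
      then acc2 ++ [k] else acc2) acc) ([] : List (List Char))
  -- for i in conflict_keys: processed_metrics[f"{i}_val"] = processed_metrics.pop(i)
  let d2 := conflict.foldl (fun d i =>
    match d.pop? i with
    | some (v, d') => d'.insert (i ++ "_val".toList) v
    | none => d) d1            -- unreachable: every conflict key is a key of d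
  d2.items.map (fun p => (String.ofList p.1, p.2))

-- ===== PORT B =====
-- for k in [k for k in d if k.endswith("/std")]: base = k[:-4]; if base+"/val" not in d: d[base+"/val"] = d.pop(base)
-- (d.pop(key) is ported as the lookup plus removal it performs; a missing key is Python's KeyError, excluded by Pre_)
def pvAltStd (pending : List (List Char)) (m : PySem.Dict (List Char) Int) :
    PySem.Dict (List Char) Int :=
  match pending with
  | [] => m
  | key :: more =>
    let stem := PySem.List.slice key none (some (-4))
    pvAltStd more
      (if m.contains (stem ++ "/val".toList) then m
       else
         match m.get? stem with
         | some w => (m.erase stem).insert (stem ++ "/val".toList) w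
         | none => m)

-- flagged = {a for a, b in zip(ks, ks[1:]) if b.startswith(a)}  with ks = sorted(d)
def pvAltFlagged (names : List (List Char)) : PySem.Set (List Char) :=
  let sorted_names := PySem.List.sorted names (fun x => x) false
  PySem.Set.ofList
    (((sorted_names.zip (PySem.List.slice sorted_names (some 1) none)).filter
        (fun ab => PySem.Chars.startswith ab.2 ab.1)).map (fun ab => ab.1))

-- for k in [k for k in d if k in flagged]: d[k + "_val"] = d.pop(k)
def pvAltRename (pending : List (List Char)) (m : PySem.Dict (List Char) Int) :
    PySem.Dict (List Char) Int :=
  match pending with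
  | [] => m
  | key :: more =>
    pvAltRename more
      (match m.get? key with
       | some w => (m.erase key).insert (key ++ "_val".toList) w
       | none => m)           -- unreachable: every flagged key is a key of m

def prepare_metrics_py_alt (metrics : List (String × Int)) : List (String × Int) :=
  let table : PySem.Dict (List Char) Int :=
    PySem.Dict.ofList (metrics.map (fun row => (row.1.toList, row.2)))
  let folded := pvAltStd (table.keys.filter
    (fun key => PySem.Chars.endswith key "/std".toList)) table
  let renamed := pvAltRename (folded.keys.filter
    (fun key => (pvAltFlagged folded.keys).contains key)) folded
  renamed.items.map (fun row => (String.ofList row.1, row.2))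

-- ===== PRECONDITION & SPEC =====
-- the distinct keys of the input, in first-occurrence order (= dict(metrics).keys())
def pvKeys0 (metrics : List (String × Int)) : List (List Char) :=
  PySem.List.dedup (metrics.map (fun p => p.1.toList))

-- one "/std" key of A's first loop: if "<base>/val" is present nothing happens; else
-- "<base>" is renamed to "<base>/val" when present, and A raises KeyError when absent (none)
def pvLiveStep (st : Option (List (List Char))) (k : List Char) :
    Option (List (List Char)) :=
  st.bind (fun s =>
    let base := PySem.List.slice k none (some (-4))
    if (base ++ "/val".toList) ∈ s then some s
    else if base ∈ s then some ((s.erase base) ++ [base ++ "/val".toList])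
    else none)

-- Pre_ excludes EXACTLY the inputs on which A raises (KeyError: a "<base>/std" key whose
-- "<base>" is missing when neither it nor "<base>/val" is live at that point of the first
-- loop); presence depends on the renames made by earlier "/std" keys, so the condition
-- scans the "/std" keys left to right tracking only the set of live key names.
def Pre_prepare_metrics_py (metrics : List (String × Int)) : Prop :=
  ((pvKeys0 metrics).filter (fun k => PySem.Chars.endswith k "/std".toList)).foldl
      pvLiveStep (some (pvKeys0 metrics)) ≠ none
instance (metrics : List (String × Int)) : Decidable (Pre_prepare_metrics_py metrics) := by
  unfold Pre_prepare_metrics_py; infer_instance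

def pvWitness_prepare_metrics_py : (List (String × Int)) := [("loss/std", 1), ("loss", 2)]

def Spec_prepare_metrics_py (metrics : List (String × Int)) (out : List (String × Int)) : Prop := out = prepare_metrics_py_alt metrics
instance (metrics : List (String × Int)) (out : List (String × Int)) : Decidable (Spec_prepare_metrics_py metrics out) := by unfold Spec_prepare_metrics_py; infer_instance

-- ===== CLAIM (what is proved, stated in full; the proofs are below) =====
def Claim_equal_prepare_metrics_py : Prop := ∀ (metrics : List (String × Int)), Dom_prepare_metrics_py metrics → Pre_prepare_metrics_py metrics → Spec_prepare_metrics_py metrics (prepare_metrics_py metrics)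

-- ===== LEMMAS AND PROOFS =====

-- the "/std" loop body (the same line of Python in A and B), proof-side name
def pvStdStep (d : PySem.Dict (List Char) Int) (k : List Char) : PySem.Dict (List Char) Int :=
  let ks := PySem.List.slice k none (some (-4))
  let kv := ks ++ "/val".toList
  if d.contains kv then d
  else
    match d.pop? ks with
    | some (v, d') => d'.insert kv v
    | none => d

-- the rename loop body (the same line of Python in A and B), proof-side name
def pvRenStep (d : PySem.Dict (List Char) Int) (i : List Char) : PySem.Dict (List Char) Int :=
  match d.pop? i with
  | some (v, d') => d'.insert (i ++ "_val".toList) v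
  | none => d

-- B's recursive loops are the folds of those bodies
lemma pvAltStd_eq_foldl (todo : List (List Char)) (d : PySem.Dict (List Char) Int) :
    pvAltStd todo d = todo.foldl pvStdStep d := by
  induction todo generalizing d with
  | nil => rfl
  | cons k rest ih =>
    rw [pvAltStd, List.foldl_cons, ih]
    congr 1
    unfold pvStdStep PySem.Dict.pop?
    rcases hg : d.get? (PySem.List.slice k none (some (-4))) with _ | w <;> simp [hg]

lemma pvAltRename_eq_foldl (todo : List (List Char)) (d : PySem.Dict (List Char) Int) :
    pvAltRename todo d = todo.foldl pvRenStep d := by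
  induction todo generalizing d with
  | nil => rfl
  | cons k rest ih =>
    rw [pvAltRename, List.foldl_cons, ih]
    congr 1
    unfold pvRenStep PySem.Dict.pop?
    rcases d.get? k with _ | w <;> simp

-- erasing a key keeps the keys of a dict Nodup (keys of erase form a sublist of keys)
lemma pvNodupKeysErase (d : PySem.Dict (List Char) Int) (k : List Char)
    (h : d.keys.Nodup) : (d.erase k).keys.Nodup := by
  apply List.Nodup.sublist _ h
  have hs : (d.items.filter (fun p => !p.1 == k)).Sublist d.items := List.filter_sublist
  simpa [PySem.Dict.erase, PySem.Dict.keys] using hs.map (fun p => p.1)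

-- the "/std" loop body keeps the keys Nodup
lemma pvStdStepNodup (d : PySem.Dict (List Char) Int) (k : List Char) (h : d.keys.Nodup) :
    (pvStdStep d k).keys.Nodup := by
  unfold pvStdStep
  simp only [PySem.Dict.pop?]
  split
  · exact h
  · rcases hg : (d.get? (PySem.List.slice k none (some (-4)))) with _ | v
    · simpa [hg] using h
    · simpa [hg] using
        PySem.Dict.nodup_keys_insert _ _ _ (pvNodupKeysErase d _ h)

-- inner loop of A's nested scan: append k once iff some j satisfies q and k is not yet in acc
lemma pvInnerFold (q : List Char → Bool) (k : List Char) :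
    ∀ (js acc : List (List Char)),
      js.foldl (fun a j => if q j && !(a.contains k) then a ++ [k] else a) acc
        = if k ∈ acc then acc
          else if js.any q then acc ++ [k] else acc := by
  intro js
  induction js with
  | nil => intro acc; simp
  | cons j js ih =>
    intro acc
    rw [List.foldl_cons]
    by_cases hm : k ∈ acc
    · have hstep : (if q j && !(acc.contains k) then acc ++ [k] else acc) = acc := by
        simp [hm]
      rw [hstep, ih acc, if_pos hm, if_pos hm]
    · by_cases hq : q j = true
      · have hstep : (if q j && !(acc.contains k) then acc ++ [k] else acc) = acc ++ [k] := by
          simp [hm, hq]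
        rw [hstep, ih (acc ++ [k])]
        simp [hm, hq, List.any_cons]
      · have hstep : (if q j && !(acc.contains k) then acc ++ [k] else acc) = acc := by
          simp [hq]
        rw [hstep, ih acc]
        simp [hm, hq, List.any_cons]

-- A's whole nested scan is a filter (the keys list is Nodup, so the dedup test never fires)
lemma pvOuterFold (js : List (List Char)) (q : List Char → List Char → Bool) :
    ∀ (ks acc : List (List Char)), ks.Nodup → (∀ k ∈ ks, k ∉ acc) →
      ks.foldl (fun a k =>
          js.foldl (fun a2 j => if q j k && !(a2.contains k) then a2 ++ [k] else a2) a) acc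
        = acc ++ ks.filter (fun k => js.any (fun j => q j k)) := by
  intro ks
  induction ks with
  | nil => intro acc _ _; simp
  | cons k ks ih =>
    intro acc hnd hdisj
    rw [List.foldl_cons, pvInnerFold (fun j => q j k) k js acc,
      if_neg (hdisj k (List.mem_cons_self ..))]
    by_cases hq : js.any (fun j => q j k) = true
    · rw [if_pos hq, ih (acc ++ [k]) (List.Nodup.of_cons hnd)]
      · simp [hq]
      · intro k' hk' hmem
        rcases List.mem_append.mp hmem with h | h
        · exact hdisj k' (List.mem_cons_of_mem _ hk') h
        · rcases List.mem_singleton.mp h with rfl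
          exact (List.nodup_cons.mp hnd).1 hk'
    · rw [if_neg hq, ih acc (List.Nodup.of_cons hnd)]
      · simp [hq]
      · exact fun k' hk' => hdisj k' (List.mem_cons_of_mem _ hk')

-- a proper extension is lexicographically larger (Python's string order on ASCII)
lemma pvLtAppend (t : List Char) (ht : t ≠ []) : ∀ a : List Char, a < a ++ t := by
  intro a
  induction a with
  | nil =>
    cases t with
    | nil => exact absurd rfl ht
    | cons y t => exact List.nil_lt_cons y t
  | cons x a ih =>
    rw [List.cons_append, List.cons_lt_cons_iff]
    exact Or.inr ⟨rfl, ih⟩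

-- any string between a prefix and its extension extends that prefix too
lemma pvPrefixBetween :
    ∀ (k s j : List Char), k <+: j → k < s → (s < j ∨ s = j) → k <+: s := by
  intro k
  induction k with
  | nil => intro s j _ _ _; exact List.nil_prefix
  | cons c k ih =>
    intro s j hpre hks hsj
    obtain ⟨t, rfl⟩ := hpre
    cases s with
    | nil => exact absurd hks (List.not_lt_nil _)
    | cons d s =>
      rw [List.cons_lt_cons_iff] at hks
      have hdc : d = c ∧ (s < k ++ t ∨ s = k ++ t) := by
        rcases hsj with hlt | heq
        · rw [List.cons_append, List.cons_lt_cons_iff] at hlt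
          rcases hks with hcd | ⟨hcd, _⟩ <;> rcases hlt with hdc | ⟨hdc, hst⟩
          · exact absurd (lt_trans hcd hdc) (lt_irrefl c)
          · exact absurd hcd (by rw [hdc]; exact lt_irrefl c)
          · exact absurd hdc (by rw [hcd]; exact lt_irrefl d)
          · exact ⟨hdc, Or.inl hst⟩
        · rw [List.cons_append] at heq
          injection heq with h1 h2
          exact ⟨h1, Or.inr h2⟩
      rcases hdc with ⟨heqdc, hsj'⟩
      subst heqdc
      rcases hks with hcd | ⟨_, hks'⟩
      · exact absurd hcd (lt_irrefl _)
      · exact (List.prefix_cons_inj _).mpr (ih s (k ++ t) ⟨t, rfl⟩ hks' hsj')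
    
-- membership in zip(l, l[1:]) is an adjacent pair of l
lemma pvMemZipTail (l : List (List Char)) (p : List Char × List Char) :
    p ∈ l.zip l.tail ↔ ∃ i : Nat, ∃ h : i + 1 < l.length, p = (l[i], l[i + 1]) := by
  rw [List.mem_iff_getElem]
  constructor
  · rintro ⟨i, hi, he⟩
    have hlen : i + 1 < l.length := by
      simp only [List.length_zip, List.length_tail] at hi; omega
    refine ⟨i, hlen, ?_⟩
    rw [← he, List.getElem_zip, List.getElem_tail]
  · rintro ⟨i, hlen, he⟩
    have hi : i < (l.zip l.tail).length := by
      simp only [List.length_zip, List.length_tail]; omega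
    refine ⟨i, hi, ?_⟩
    rw [List.getElem_zip, List.getElem_tail, he]

-- the port's sorted(d) and the library's LinearOrder-instance sorted are the same list
-- (the two Decidable instances decide the same lexicographic order)
lemma pvSortedInst (keys : List (List Char)) :
    @PySem.List.sorted (List Char) (List Char) List.instLT (fun a b => a.decidableLT b) keys (fun x => x) false
    = @PySem.List.sorted (List Char) (List Char)
        (@Preorder.toLT _ (@PartialOrder.toPreorder _ (@LinearOrder.toPartialOrder _ List.instLinearOrder)))
        (@LinearOrder.toDecidableLT _ List.instLinearOrder) keys (fun x => x) false := by
  have hcmp : (fun a b : List Char => @decide (a < b) (a.decidableLT b))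
      = (fun a b : List Char => @decide (a < b) (@LinearOrder.toDecidableLT _ List.instLinearOrder a b)) :=
    funext fun a => funext fun b => decide_eq_decide.mpr Iff.rfl
  show List.foldl (fun acc x => PySem.List.insertBy
        (fun a b : List Char => @decide (a < b) (a.decidableLT b)) x acc) [] keys
    = List.foldl (fun acc x => PySem.List.insertBy
        (fun a b : List Char => @decide (a < b) (@LinearOrder.toDecidableLT _ List.instLinearOrder a b)) x acc) [] keys
  rw [hcmp]

-- A's conflict test (some other key extends k) = B's flagged-set membership, for k a key
lemma pvFlagMem (keys : List (List Char)) (hnd : keys.Nodup) (k : List Char)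
    (hk : k ∈ keys) :
    keys.any (fun j => PySem.Chars.startswith j k && j != k)
      = PySem.Set.contains (pvAltFlagged keys) k := by
  rw [Bool.eq_iff_iff, PySem.Set.contains_iff]
  unfold pvAltFlagged
  rw [PySem.Set.mem_ofList, pvSortedInst, PySem.List.slice_from_one]
  set S := @PySem.List.sorted (List Char) (List Char)
      (@Preorder.toLT _ (@PartialOrder.toPreorder _ (@LinearOrder.toPartialOrder _ List.instLinearOrder)))
      (@LinearOrder.toDecidableLT _ List.instLinearOrder) keys (fun x => x) false with hS
  have hSP : S.Perm keys := by
    rw [hS, ← pvSortedInst]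
    exact PySem.List.sorted_perm keys (fun x => x) false
  have hndS : S.Nodup := hSP.nodup_iff.mpr hnd
  have hmono : ∀ (p q : Nat) (hpq : p ≤ q) (hq : q < S.length),
      S[p]'(lt_of_le_of_lt hpq hq) ≤ S[q] := by
    intro p q hpq hq
    exact PySem.List.sorted_id_getElem_mono keys hpq hq
  simp only [List.mem_map, List.mem_filter, List.any_eq_true, Bool.and_eq_true,
    bne_iff_ne, ne_eq, PySem.Chars.startswith_iff]
  constructor
  · rintro ⟨j, hj, hpre, hne⟩
    -- k is a proper prefix of j, hence k < j lexicographically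
    obtain ⟨t, rfl⟩ := hpre
    have ht : t ≠ [] := by rintro rfl; simp at hne
    have hkj : k < k ++ t := pvLtAppend t ht k
    -- locate k and j in the sorted list
    obtain ⟨p, hp, hkp⟩ := List.mem_iff_getElem.mp (hSP.mem_iff.mpr hk)
    obtain ⟨q, hq, hjq⟩ := List.mem_iff_getElem.mp (hSP.mem_iff.mpr hj)
    -- hence p < q in the sorted list
    have hpq : p < q := by
      rcases Nat.lt_trichotomy p q with h | h | h
      · exact h
      · subst h
        rw [hkp] at hjq
        exact absurd hjq (ne_of_lt hkj)
      · have hle := hmono q p (Nat.le_of_lt h) hp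
        rw [hkp, hjq] at hle
        exact absurd hkj (not_lt_of_ge hle)
    have hp1 : p + 1 < S.length := by omega
    -- the successor of k in sorted order lies between k and j, so k is a prefix of it
    have hlek : k ≤ S[p + 1] := by
      have hle := hmono p (p + 1) (Nat.le_succ p) hp1
      rwa [hkp] at hle
    have hkl : k < S[p + 1] := by
      rcases lt_or_eq_of_le hlek with h | h
      · exact h
      · exact absurd ((List.Nodup.getElem_inj_iff hndS).mp (hkp.trans h)) (by omega)
    have hsj : S[p + 1] < k ++ t ∨ S[p + 1] = k ++ t := by
      rcases Nat.lt_or_ge (p + 1) q with h | h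
      · refine Or.inl ?_
        have hle := hmono (p + 1) q (Nat.le_of_lt h) hq
        rw [hjq] at hle
        refine lt_of_le_of_ne hle (fun he => ?_)
        rw [← hjq] at he
        exact absurd ((List.Nodup.getElem_inj_iff hndS).mp he) (by omega)
      · have hq1 : p + 1 = q := by omega
        subst hq1
        exact Or.inr hjq
    have hps : k <+: S[p + 1] := pvPrefixBetween k _ (k ++ t) ⟨t, rfl⟩ hkl hsj
    exact ⟨(k, S[p + 1]), ⟨(pvMemZipTail _ _).mpr ⟨p, hp1, by rw [hkp]⟩, hps⟩, rfl⟩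
  · rintro ⟨⟨a, b⟩, ⟨hzip, hpre⟩, rfl⟩
    obtain ⟨i, hi, he⟩ := (pvMemZipTail _ _).mp hzip
    injection he with h1 h2
    refine ⟨b, ?_, hpre, ?_⟩
    · exact hSP.mem_iff.mp (h2 ▸ List.getElem_mem hi)
    · intro hba
      have h12 : S[i] = S[i + 1] := by rw [← h1, ← h2, hba]
      exact absurd ((List.Nodup.getElem_inj_iff hndS).mp h12) (by omega)

-- the whole pipeline, generalized over the initial dict
lemma pvMainGen (d0 : PySem.Dict (List Char) Int) (hnd0 : d0.keys.Nodup) :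
    (let d1 := d0.keys.foldl (fun d k =>
        if PySem.Chars.endswith k "/std".toList then pvStdStep d k else d) d0
     let conflict := d1.keys.foldl (fun acc k =>
        d1.keys.foldl (fun acc2 j =>
          if (PySem.Chars.startswith j k && j != k) && !(acc2.contains k)
          then acc2 ++ [k] else acc2) acc) ([] : List (List Char))
     (conflict.foldl pvRenStep d1).items.map (fun p => (String.ofList p.1, p.2)))
    = (let d1 := pvAltStd (d0.keys.filter (fun k => PySem.Chars.endswith k "/std".toList)) d0
       let d2 := pvAltRename (d1.keys.filter (fun k => (pvAltFlagged d1.keys).contains k)) d1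
       d2.items.map (fun p => (String.ofList p.1, p.2))) := by
  -- the two "/std" stages agree
  have hd1 : d0.keys.foldl (fun d k =>
      if PySem.Chars.endswith k "/std".toList then pvStdStep d k else d) d0
      = pvAltStd (d0.keys.filter (fun k => PySem.Chars.endswith k "/std".toList)) d0 := by
    rw [pvAltStd_eq_foldl, PySem.List.foldl_if_eq_foldl_filter]
  simp only [hd1]
  set d1 := pvAltStd (d0.keys.filter (fun k => PySem.Chars.endswith k "/std".toList)) d0
    with hd1def
  have hnd1 : d1.keys.Nodup := by
    rw [hd1def, pvAltStd_eq_foldl]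
    refine List.foldlRecOn
      (motive := fun d : PySem.Dict (List Char) Int => d.keys.Nodup) _ _ hnd0 ?_
    intro d hd k _
    exact pvStdStepNodup d k hd
  -- the two conflict stages agree
  have hconf : d1.keys.foldl (fun acc k =>
      d1.keys.foldl (fun acc2 j =>
        if (PySem.Chars.startswith j k && j != k) && !(acc2.contains k)
        then acc2 ++ [k] else acc2) acc) ([] : List (List Char))
      = d1.keys.filter (fun k => (pvAltFlagged d1.keys).contains k) := by
    rw [pvOuterFold d1.keys (fun j k => PySem.Chars.startswith j k && j != k) d1.keys []
      hnd1 (by simp), List.nil_append]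
    exact List.filter_congr (fun k hk => pvFlagMem d1.keys hnd1 k hk)
  rw [hconf, pvAltRename_eq_foldl]

-- ===== VERDICT (by name: the statement is the Claim_ definition above) =====
theorem prepare_metrics_py_spec : Claim_equal_prepare_metrics_py := by
  intro metrics _ _
  unfold Spec_prepare_metrics_py
  exact pvMainGen (PySem.Dict.ofList (metrics.map (fun p => (p.1.toList, p.2))))
    (PySem.Dict.nodup_keys_ofList _)
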